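-- pv_equiv track=rewrite | github.com/Viet281101/ITLMAU | Semestre_6_L3/Ingénierie_des_langues/TPs/TP4/exo_1.py | count_unigram_transitions
-- ===== SOURCE A (Python) =====
-- def count_unigram_transitions(corpus) -> dict:
-- 	'''
-- 	paramètre : corpus (séquence de séquence de tokens)
-- 	returns : dictionnaire à deux niveaux contenant pour chaque mot le nombre d'apparitions pour chaque mot suivant possible.
-- 	'''
-- 	transitions = {}
--
-- 	for sentence in corpus:
-- 		for i in range(len(sentence)-1):
-- 			if sentence[i] not in transitions:
-- 				transitions[sentence[i]] = {}
-- 			if sentence[i+1] not in transitions[sentence[i]]: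
-- 				transitions[sentence[i]][sentence[i+1]] = 0
-- 			transitions[sentence[i]][sentence[i+1]] += 1
--
-- 	return transitions
-- ===== SOURCE B (Python) =====
-- def count_unigram_transitions(corpus) -> dict:
--     '''Two-pass version: tally bigrams into one flat dict, then regroup into the nested shape.'''
--     flat = {}
--     for sentence in corpus:
--         for w1, w2 in zip(sentence, sentence[1:]):
--             flat[(w1, w2)] = flat.get((w1, w2), 0) + 1
--     result = {}
--     for (w1, w2), c in flat.items():
--         result.setdefault(w1, {})[w2] = c
--     return result
-- ===== Notes on version B (the rewrite author's own statement) =====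
-- stated objective: alternative
-- what changed: B first tallies all bigrams of the corpus into one flat dict keyed by the (word, next-word) pair, then regroups that flat table into the nested dict in a separate second pass, instead of A's single pass that inserts into a nested dict with explicit membership tests.
import Mathlib
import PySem

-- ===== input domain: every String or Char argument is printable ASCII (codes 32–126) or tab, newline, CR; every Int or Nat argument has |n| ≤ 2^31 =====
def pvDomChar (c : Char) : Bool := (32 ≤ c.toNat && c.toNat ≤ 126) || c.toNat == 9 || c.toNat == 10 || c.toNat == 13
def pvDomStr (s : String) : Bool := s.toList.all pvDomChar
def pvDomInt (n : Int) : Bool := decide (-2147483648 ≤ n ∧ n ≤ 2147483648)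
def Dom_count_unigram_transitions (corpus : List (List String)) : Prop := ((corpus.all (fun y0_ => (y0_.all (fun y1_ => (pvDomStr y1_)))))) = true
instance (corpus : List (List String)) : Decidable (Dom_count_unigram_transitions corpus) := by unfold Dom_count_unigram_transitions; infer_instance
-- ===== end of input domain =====

-- B replaces A's incremental nested-dict build by two passes — a flat bigram tally, then a
-- regrouping pass — an alternative decomposition of the same counting work (equal cost).

-- ===== PORT A =====
def count_unigram_transitions (corpus : List (List String)) : List (String × List (String × Int)) :=
  let transitions : PySem.Dict String (PySem.Dict String Int) :=
    corpus.foldl (fun t sentence =>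
      (PySem.List.pyRange 0 ((sentence.length : Int) - 1) 1).foldl (fun t i =>
        let w1 := PySem.List.pyGetD sentence i ""
        let w2 := PySem.List.pyGetD sentence (i + 1) ""
        let t := if t.contains w1 then t else t.insert w1 PySem.Dict.empty
        let inner := t.getD w1 PySem.Dict.empty
        let inner := if inner.contains w2 then inner else inner.insert w2 0
        t.insert w1 (inner.insert w2 (inner.getD w2 0 + 1))) t) PySem.Dict.empty
  transitions.items.map (fun q => (q.1, q.2.items))


-- ===== PORT B =====
def count_unigram_transitions_alt (corpus : List (List String)) : List (String × List (String × Int)) :=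
  let flat : PySem.Dict (String × String) Int :=
    corpus.foldl (fun d sentence =>
      (sentence.zip (PySem.List.slice sentence (some 1) none)).foldl
        (fun d p => d.insert p (d.getD p 0 + 1)) d) PySem.Dict.empty
  let result : PySem.Dict String (PySem.Dict String Int) :=
    flat.items.foldl (fun r q =>
      let r := r.setdefault q.1.1 PySem.Dict.empty
      r.insert q.1.1 ((r.getD q.1.1 PySem.Dict.empty).insert q.1.2 q.2))
      PySem.Dict.empty
  result.items.map (fun q => (q.1, q.2.items))


-- ===== PRECONDITION & SPEC =====
def Spec_count_unigram_transitions (corpus : List (List String)) (out : List (String × List (String × Int))) : Prop := out = count_unigram_transitions_alt corpus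
instance (corpus : List (List String)) (out : List (String × List (String × Int))) : Decidable (Spec_count_unigram_transitions corpus out) := by unfold Spec_count_unigram_transitions; infer_instance

-- ===== CLAIM (what is proved, stated in full; the proofs are below) =====
def Claim_equal_count_unigram_transitions : Prop := ∀ (corpus : List (List String)), Dom_count_unigram_transitions corpus → Spec_count_unigram_transitions corpus (count_unigram_transitions corpus)

-- ===== LEMMAS AND PROOFS =====

def pvNStep (t : PySem.Dict String (PySem.Dict String Int)) (p : String × String) :
    PySem.Dict String (PySem.Dict String Int) :=
  t.modify p.1 PySem.Dict.empty (fun inner => inner.modify p.2 0 (· + 1))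

def pvFirsts (bs : List (String × String)) : List String :=
  PySem.Set.ofList (bs.map Prod.fst)

def pvSeconds (a : String) (bs : List (String × String)) : List String :=
  PySem.Set.ofList ((bs.filter (fun p => p.1 == a)).map Prod.snd)

def pvInner (a : String) (bs : List (String × String)) : PySem.Dict String Int :=
  ⟨(pvSeconds a bs).map (fun b => (b, (bs.count (a, b) : Int)))⟩

def pvCanon (bs : List (String × String)) : PySem.Dict String (PySem.Dict String Int) :=
  ⟨(pvFirsts bs).map (fun a => (a, pvInner a bs))⟩

lemma pvMem_firsts (bs : List (String × String)) (a : String) :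
    a ∈ pvFirsts bs ↔ a ∈ bs.map Prod.fst := PySem.Set.mem_ofList _ _

lemma pvMem_seconds (bs : List (String × String)) (a b : String) :
    b ∈ pvSeconds a bs ↔ (a, b) ∈ bs := by
  unfold pvSeconds
  rw [PySem.Set.mem_ofList]
  constructor
  · rintro h
    simp only [List.mem_map, List.mem_filter, beq_iff_eq] at h
    obtain ⟨p, ⟨hp, hp1⟩, hp2⟩ := h
    have : p = (a, b) := by cases p; simp_all
    rwa [this] at hp
  · intro h
    simp only [List.mem_map, List.mem_filter, beq_iff_eq]
    exact ⟨(a, b), ⟨h, rfl⟩, rfl⟩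

lemma pvKeys_canon (bs : List (String × String)) : (pvCanon bs).keys = pvFirsts bs := by
  simp [PySem.Dict.keys, pvCanon, Function.comp_def]

lemma pvCanon_contains (bs : List (String × String)) (a : String) :
    (pvCanon bs).contains a = true ↔ a ∈ pvFirsts bs := by
  rw [PySem.Dict.contains_iff_mem_keys, pvKeys_canon]

lemma pvCanon_getD_of_mem {bs : List (String × String)} {a : String} (ha : a ∈ pvFirsts bs) :
    (pvCanon bs).getD a PySem.Dict.empty = pvInner a bs := by
  apply PySem.Dict.getD_of_mem_items
  · exact List.mem_map_of_mem ha
  · rw [pvKeys_canon]; exact PySem.Set.nodup_ofList _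

lemma pvInner_keys (a : String) (bs : List (String × String)) :
    (pvInner a bs).keys = pvSeconds a bs := by
  simp [PySem.Dict.keys, pvInner, Function.comp_def]

lemma pvInner_contains (bs : List (String × String)) (a b : String) :
    (pvInner a bs).contains b = true ↔ b ∈ pvSeconds a bs := by
  rw [PySem.Dict.contains_iff_mem_keys, pvInner_keys]

lemma pvInner_getD_of_mem {bs : List (String × String)} {a b : String} (hb : b ∈ pvSeconds a bs) :
    (pvInner a bs).getD b 0 = (bs.count (a, b) : Int) := by
  apply PySem.Dict.getD_of_mem_items
  · exact List.mem_map_of_mem hb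
  · rw [pvInner_keys]; exact PySem.Set.nodup_ofList _

lemma pvFirsts_append (bs : List (String × String)) (p : String × String) :
    pvFirsts (bs ++ [p]) = PySem.Set.add (pvFirsts bs) p.1 := by
  simp [pvFirsts, PySem.Set.ofList_append, PySem.Set.update_cons, PySem.Set.update_nil]

lemma pvSeconds_append (a : String) (bs : List (String × String)) (p : String × String) :
    pvSeconds a (bs ++ [p]) =
      if p.1 = a then PySem.Set.add (pvSeconds a bs) p.2 else pvSeconds a bs := by
  unfold pvSeconds
  rw [List.filter_append]
  by_cases h : p.1 = a
  · simp [h, PySem.Set.ofList_append, PySem.Set.update_cons, PySem.Set.update_nil]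
  · simp [h]

lemma pvInner_append_of_ne {a : String} {p : String × String} (h : p.1 ≠ a)
    (bs : List (String × String)) : pvInner a (bs ++ [p]) = pvInner a bs := by
  unfold pvInner
  rw [pvSeconds_append, if_neg h]
  congr 1
  apply List.map_congr_left
  intro b _
  have : (a, b) ≠ p := by intro he; exact h (by rw [← he])
  simp [List.count_append, List.count_singleton, this.symm]

lemma pvSet_add_of_mem {α : Type} [BEq α] [LawfulBEq α] (s : PySem.Set α) (x : α)
    (h : x ∈ s) : s.add x = s := by
  simp [PySem.Set.add, PySem.Set.contains, List.elem_eq_contains, h]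

lemma pvSet_add_of_not_mem {α : Type} [BEq α] [LawfulBEq α] (s : PySem.Set α) (x : α)
    (h : ¬ x ∈ s) : s.add x = s ++ [x] := by
  simp [PySem.Set.add, PySem.Set.contains, List.elem_eq_contains, h]

lemma pvCanon_append (bs : List (String × String)) (p : String × String) :
    pvCanon (bs ++ [p]) = pvNStep (pvCanon bs) p := by
  unfold pvNStep PySem.Dict.modify
  by_cases hp1 : p.1 ∈ pvFirsts bs
  · have hc : (pvCanon bs).contains p.1 = true := (pvCanon_contains bs p.1).mpr hp1
    rw [pvCanon_getD_of_mem hp1]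
    apply PySem.Dict.ext
    rw [PySem.Dict.items_insert_of_contains _ _ hc]
    show (pvCanon (bs ++ [p])).items
      = ((pvFirsts bs).map (fun a => (a, pvInner a bs))).map
          (fun q => if q.1 == p.1 then (p.1, (pvInner p.1 bs).insert p.2 ((pvInner p.1 bs).getD p.2 0 + 1)) else q)
    rw [List.map_map]
    show ((pvFirsts (bs ++ [p])).map (fun a => (a, pvInner a (bs ++ [p])))) = _
    rw [pvFirsts_append, pvSet_add_of_mem _ _ hp1]
    apply List.map_congr_left
    intro a ha
    by_cases hap : a = p.1
    · subst hap
      simp only [Function.comp_apply, beq_self_eq_true, if_true]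
      refine congrArg _ ?_
      by_cases hb : p.2 ∈ pvSeconds p.1 bs
      · have hcb : (pvInner p.1 bs).contains p.2 = true := (pvInner_contains bs p.1 p.2).mpr hb
        rw [pvInner_getD_of_mem hb]
        apply PySem.Dict.ext
        rw [PySem.Dict.items_insert_of_contains _ _ hcb]
        show (pvInner p.1 (bs ++ [p])).items = ((pvSeconds p.1 bs).map _).map _
        unfold pvInner
        rw [pvSeconds_append, if_pos rfl, pvSet_add_of_mem _ _ hb, List.map_map]
        apply List.map_congr_left
        intro b hbmem
        by_cases hbp : b = p.2
        · subst hbp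
          simp only [Function.comp_apply, beq_self_eq_true, if_true]
          have hpe : ((p.1, p.2) : String × String) = p := rfl
          simp [List.count_append, hpe]
        · have hne : (p.1, b) ≠ p := by intro he; cases p; simp_all
          simp only [Function.comp_apply, beq_iff_eq, hbp, if_false]
          simp [List.count_append, hne.symm]
      · have hcb : (pvInner p.1 bs).contains p.2 = false := by
          rw [Bool.eq_false_iff]; intro h; exact hb ((pvInner_contains bs p.1 p.2).mp h)
        have hnb : (p.1, p.2) ∉ bs := fun h => hb ((pvMem_seconds bs p.1 p.2).mpr h)
        rw [PySem.Dict.getD_of_not_contains _ _ hcb]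
        apply PySem.Dict.ext
        rw [PySem.Dict.items_insert_of_not_contains _ _ hcb]
        show (pvInner p.1 (bs ++ [p])).items = (pvInner p.1 bs).items ++ [(p.2, 0 + 1)]
        have hpe : ((p.1, p.2) : String × String) = p := rfl
        have hcnt0 : bs.count (p.1, p.2) = 0 := List.count_eq_zero.mpr hnb
        show ((pvSeconds p.1 (bs ++ [p])).map (fun b => (b, ((bs ++ [p]).count (p.1, b) : Int))))
          = ((pvSeconds p.1 bs).map (fun b => (b, (bs.count (p.1, b) : Int)))) ++ [(p.2, 0 + 1)]
        rw [pvSeconds_append, if_pos rfl, pvSet_add_of_not_mem _ _ hb, List.map_append]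
        congr 1
        · apply List.map_congr_left
          intro b hbmem
          have hne : (p.1, b) ≠ p := by
            intro he; rw [← hpe] at he; injection he with h1 h2
            exact hb (h2 ▸ hbmem)
          simp [List.count_append, hne.symm]
        · simp [List.count_append, hpe, hcnt0]
    · have hbeq : (a == p.1) = false := by simp [hap]
      have hne : p.1 ≠ a := fun h => hap h.symm
      simp [Function.comp_def, hap, pvInner_append_of_ne hne]
  · have hc : (pvCanon bs).contains p.1 = false := by
      rw [Bool.eq_false_iff]; intro h; exact hp1 ((pvCanon_contains bs p.1).mp h)
    have hnomem : p.1 ∉ bs.map Prod.fst := fun h => hp1 ((pvMem_firsts bs p.1).mpr h)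
    rw [PySem.Dict.getD_of_not_contains _ _ hc]
    apply PySem.Dict.ext
    rw [PySem.Dict.items_insert_of_not_contains _ _ hc]
    show (pvCanon (bs ++ [p])).items
      = (pvCanon bs).items ++ [(p.1, PySem.Dict.empty.insert p.2 (PySem.Dict.empty.getD p.2 0 + 1))]
    have hfilter : bs.filter (fun q => q.1 == p.1) = [] := by
      rw [List.filter_eq_nil_iff]
      intro q hq hbeq
      have hq1 : q.1 = p.1 := by simpa using hbeq
      exact absurd (hq1 ▸ List.mem_map_of_mem hq) hnomem
    have hcnt0 : bs.count (p.1, p.2) = 0 := List.count_eq_zero.mpr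
      (fun h => hnomem (List.mem_map_of_mem h))
    show ((pvFirsts (bs ++ [p])).map (fun a => (a, pvInner a (bs ++ [p])))) = _
    rw [pvFirsts_append, pvSet_add_of_not_mem _ _ hp1, List.map_append]
    congr 1
    · apply List.map_congr_left
      intro a ha
      have hne : p.1 ≠ a := fun h => hp1 (h ▸ ha)
      rw [pvInner_append_of_ne hne]
    · have hsec : pvSeconds p.1 (bs ++ [p]) = [p.2] := by
        unfold pvSeconds
        rw [List.filter_append, hfilter]
        simp [PySem.Set.ofList, PySem.Set.add, PySem.Set.empty, PySem.Set.contains]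
      simp only [List.map_cons, List.map_nil]
      unfold pvInner
      rw [hsec]
      simp [List.count_append, hcnt0, PySem.Dict.insert, PySem.Dict.empty,
        PySem.Dict.contains, PySem.Dict.getD, PySem.Dict.get?]

lemma pvNFold_eq_canon (bs : List (String × String)) :
    bs.foldl pvNStep PySem.Dict.empty = pvCanon bs := by
  induction bs using List.reverseRecOn with
  | nil => rfl
  | append_singleton bs p ih =>
    rw [List.foldl_append, List.foldl_cons, List.foldl_nil, ih, ← pvCanon_append]

def pvRStep (r : PySem.Dict String (PySem.Dict String Int)) (q : (String × String) × Int) :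
    PySem.Dict String (PySem.Dict String Int) :=
  r.modify q.1.1 PySem.Dict.empty (fun inner => inner.insert q.1.2 q.2)

def pvGFirsts (l : List ((String × String) × Int)) : List String :=
  PySem.Set.ofList (l.map (fun q => q.1.1))

def pvGInner (a : String) (l : List ((String × String) × Int)) : PySem.Dict String Int :=
  ⟨(l.filter (fun q => q.1.1 == a)).map (fun q => (q.1.2, q.2))⟩

def pvG (l : List ((String × String) × Int)) : PySem.Dict String (PySem.Dict String Int) :=
  ⟨(pvGFirsts l).map (fun a => (a, pvGInner a l))⟩

lemma pvKeys_G (l : List ((String × String) × Int)) : (pvG l).keys = pvGFirsts l := by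
  simp [PySem.Dict.keys, pvG, Function.comp_def]

lemma pvG_contains (l : List ((String × String) × Int)) (a : String) :
    (pvG l).contains a = true ↔ a ∈ pvGFirsts l := by
  rw [PySem.Dict.contains_iff_mem_keys, pvKeys_G]

lemma pvG_getD_of_mem {l : List ((String × String) × Int)} {a : String} (ha : a ∈ pvGFirsts l) :
    (pvG l).getD a PySem.Dict.empty = pvGInner a l := by
  apply PySem.Dict.getD_of_mem_items
  · exact List.mem_map_of_mem ha
  · rw [pvKeys_G]; exact PySem.Set.nodup_ofList _

lemma pvGInner_keys (a : String) (l : List ((String × String) × Int)) :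
    (pvGInner a l).keys = (l.filter (fun q => q.1.1 == a)).map (fun q => q.1.2) := by
  simp [PySem.Dict.keys, pvGInner, Function.comp_def]

lemma pvGFilter_append_of_ne {a : String} {q : (String × String) × Int} (h : q.1.1 ≠ a)
    (l : List ((String × String) × Int)) :
    (l ++ [q]).filter (fun r => r.1.1 == a) = l.filter (fun r => r.1.1 == a) := by
  rw [List.filter_append]
  simp [h]

lemma pvRFoldG (l : List ((String × String) × Int)) (hnd : (l.map Prod.fst).Nodup) :
    l.foldl pvRStep PySem.Dict.empty = pvG l := by
  induction l using List.reverseRecOn with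
  | nil => rfl
  | append_singleton l q ih =>
    rw [List.map_append, List.nodup_append] at hnd
    obtain ⟨hnd1, -, hdisj⟩ := hnd
    have hfresh : q.1 ∉ l.map Prod.fst := fun h => hdisj _ h q.1 (by simp) rfl
    rw [List.foldl_append, List.foldl_cons, List.foldl_nil, ih hnd1]
    show pvRStep (pvG l) q = pvG (l ++ [q])
    unfold pvRStep PySem.Dict.modify
    have hGF : pvGFirsts (l ++ [q]) = PySem.Set.add (pvGFirsts l) q.1.1 := by
      simp [pvGFirsts, PySem.Set.ofList_append, PySem.Set.update_cons, PySem.Set.update_nil]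
    have hnotinner : q.1.2 ∉ (l.filter (fun r => r.1.1 == q.1.1)).map (fun r => r.1.2) := by
      intro h
      simp only [List.mem_map, List.mem_filter, beq_iff_eq] at h
      obtain ⟨r, ⟨hr, hr1⟩, hr2⟩ := h
      apply hfresh
      have : r.1 = q.1 := Prod.ext hr1 hr2
      exact this ▸ List.mem_map_of_mem hr
    by_cases hq : q.1.1 ∈ pvGFirsts l
    · have hc : (pvG l).contains q.1.1 = true := (pvG_contains l q.1.1).mpr hq
      rw [pvG_getD_of_mem hq]
      have hcb : (pvGInner q.1.1 l).contains q.1.2 = false := by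
        rw [Bool.eq_false_iff]
        intro h
        rw [PySem.Dict.contains_iff_mem_keys, pvGInner_keys] at h
        exact hnotinner h
      apply PySem.Dict.ext
      rw [PySem.Dict.items_insert_of_contains _ _ hc]
      show ((pvGFirsts l).map (fun a => (a, pvGInner a l))).map
          (fun r => if r.1 == q.1.1 then (q.1.1, (pvGInner q.1.1 l).insert q.1.2 q.2) else r)
        = (pvG (l ++ [q])).items
      rw [List.map_map]
      show _ = ((pvGFirsts (l ++ [q])).map (fun a => (a, pvGInner a (l ++ [q]))))
      rw [hGF, pvSet_add_of_mem _ _ hq]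
      apply List.map_congr_left
      intro a ha
      by_cases hap : a = q.1.1
      · subst hap
        simp only [Function.comp_apply, beq_self_eq_true, if_true]
        refine congrArg _ ?_
        apply PySem.Dict.ext
        rw [PySem.Dict.items_insert_of_not_contains _ _ hcb]
        show (pvGInner q.1.1 l).items ++ [(q.1.2, q.2)] = (pvGInner q.1.1 (l ++ [q])).items
        unfold pvGInner
        rw [List.filter_append, List.map_append]
        have hfq : [q].filter (fun r => r.1.1 == q.1.1) = [q] := by simp
        rw [hfq]
        rfl
      · have hbeq : (a == q.1.1) = false := by simp [hap]
        have hne : q.1.1 ≠ a := fun h => hap h.symm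
        simp only [Function.comp_apply, hbeq, Bool.false_eq_true, if_false]
        unfold pvGInner
        rw [pvGFilter_append_of_ne hne]
    · have hc : (pvG l).contains q.1.1 = false := by
        rw [Bool.eq_false_iff]; intro h; exact hq ((pvG_contains l q.1.1).mp h)
      have hnofirst : ∀ r ∈ l, r.1.1 ≠ q.1.1 := by
        intro r hr he
        exact hq (by
          rw [pvGFirsts, PySem.Set.mem_ofList]
          exact he ▸ List.mem_map_of_mem hr (f := fun q => q.1.1))
      rw [PySem.Dict.getD_of_not_contains _ _ hc]
      apply PySem.Dict.ext
      rw [PySem.Dict.items_insert_of_not_contains _ _ hc]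
      show (pvG l).items ++ [(q.1.1, PySem.Dict.empty.insert q.1.2 q.2)] = (pvG (l ++ [q])).items
      show _ = ((pvGFirsts (l ++ [q])).map (fun a => (a, pvGInner a (l ++ [q]))))
      rw [hGF, pvSet_add_of_not_mem _ _ hq, List.map_append]
      congr 1
      · apply List.map_congr_left
        intro a ha
        have hne : q.1.1 ≠ a := fun h => hq (h ▸ ha)
        unfold pvGInner
        rw [pvGFilter_append_of_ne hne]
      · have hfl : l.filter (fun r => r.1.1 == q.1.1) = [] := by
          rw [List.filter_eq_nil_iff]
          intro r hr hbe
          exact hnofirst r hr (by simpa using hbe)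
        simp only [List.map_cons, List.map_nil]
        unfold pvGInner
        rw [List.filter_append, hfl]
        simp [PySem.Dict.insert, PySem.Dict.empty, PySem.Dict.contains]

lemma pvOfList_map {α β : Type} [BEq α] [LawfulBEq α] [BEq β] [LawfulBEq β]
    (xs : List α) (f : α → β) :
    PySem.Set.ofList ((PySem.Set.ofList xs).map f) = PySem.Set.ofList (xs.map f) := by
  induction xs using List.reverseRecOn with
  | nil => rfl
  | append_singleton xs x ih =>
    rw [PySem.Set.ofList_append, PySem.Set.update_cons, PySem.Set.update_nil, List.map_append]
    by_cases hx : x ∈ PySem.Set.ofList xs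
    · rw [pvSet_add_of_mem _ _ hx, ih]
      have hfx : f x ∈ PySem.Set.ofList (xs.map f) := by
        rw [PySem.Set.mem_ofList]
        exact List.mem_map_of_mem ((PySem.Set.mem_ofList xs x).mp hx)
      simp only [List.map_cons, List.map_nil]
      rw [PySem.Set.ofList_append, PySem.Set.update_cons, PySem.Set.update_nil,
        pvSet_add_of_mem _ _ hfx]
    · rw [pvSet_add_of_not_mem _ _ hx, List.map_append]
      simp only [List.map_cons, List.map_nil]
      rw [PySem.Set.ofList_append, PySem.Set.update_cons, PySem.Set.update_nil, ih,
        PySem.Set.ofList_append, PySem.Set.update_cons, PySem.Set.update_nil]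

lemma pvFilter_ofList (bs : List (String × String)) (a : String) :
    (PySem.Set.ofList bs).filter (fun k => k.1 == a) = (pvSeconds a bs).map (fun b => (a, b)) := by
  induction bs using List.reverseRecOn with
  | nil => rfl
  | append_singleton bs p ih =>
    rw [PySem.Set.ofList_append, PySem.Set.update_cons, PySem.Set.update_nil, pvSeconds_append]
    by_cases hp : p ∈ PySem.Set.ofList bs
    · have hpbs : p ∈ bs := (PySem.Set.mem_ofList bs p).mp hp
      rw [pvSet_add_of_mem _ _ hp]
      by_cases h1 : p.1 = a
      · rw [if_pos h1]
        have hp2 : p.2 ∈ pvSeconds a bs := by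
          rw [pvMem_seconds]
          have : ((a, p.2) : String × String) = p := by rw [← h1]
          rw [this]; exact hpbs
        rw [pvSet_add_of_mem _ _ hp2, ih]
      · rw [if_neg h1, ih]
    · have hpbs : p ∉ bs := fun h => hp ((PySem.Set.mem_ofList bs p).mpr h)
      rw [pvSet_add_of_not_mem _ _ hp, List.filter_append]
      by_cases h1 : p.1 = a
      · have hfp : [p].filter (fun k => k.1 == a) = [p] := by simp [h1]
        rw [hfp, if_pos h1, ih]
        have hp2 : p.2 ∉ pvSeconds a bs := by
          rw [pvMem_seconds]
          intro h
          have : ((a, p.2) : String × String) = p := by rw [← h1]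
          exact hpbs (this ▸ h)
        rw [pvSet_add_of_not_mem _ _ hp2, List.map_append]
        have : ((a, p.2) : String × String) = p := by rw [← h1]
        simp [this]
      · have hfp : [p].filter (fun k => k.1 == a) = [] := by simp [h1]
        rw [hfp, if_neg h1, ih, List.append_nil]

lemma pvG_counter_eq_canon (bs : List (String × String)) :
    pvG ((PySem.Dict.counter bs).items) = pvCanon bs := by
  rw [PySem.Dict.items_counter]
  unfold pvG pvCanon
  have hfirsts : pvGFirsts ((PySem.Set.ofList bs).map (fun k => (k, (bs.count k : Int))))
      = pvFirsts bs := by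
    unfold pvGFirsts pvFirsts
    rw [List.map_map]
    have : ((fun q => q.1.1) ∘ fun k => (k, (bs.count k : Int))) = (Prod.fst : String × String → String) := rfl
    rw [this, pvOfList_map]
  rw [hfirsts]
  apply PySem.Dict.ext
  show (pvFirsts bs).map _ = (pvFirsts bs).map _
  apply List.map_congr_left
  intro a ha
  refine congrArg _ ?_
  unfold pvGInner pvInner
  refine congrArg PySem.Dict.mk ?_
  rw [List.filter_map]
  have hcomp : ((fun q => q.1.1 == a) ∘ fun k => (k, (bs.count k : Int)))
      = (fun k => k.1 == a) := rfl
  rw [hcomp, pvFilter_ofList, List.map_map, List.map_map]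
  rfl

def pvBigrams (corpus : List (List String)) : List (String × String) :=
  corpus.flatMap (fun s => s.zip s.tail)

lemma pvAStep_eq_nstep (t : PySem.Dict String (PySem.Dict String Int)) (w1 w2 : String) :
    (let t' := if t.contains w1 then t else t.insert w1 PySem.Dict.empty
     let inner := t'.getD w1 PySem.Dict.empty
     let inner' := if inner.contains w2 then inner else inner.insert w2 0
     t'.insert w1 (inner'.insert w2 (inner'.getD w2 0 + 1))) = pvNStep t (w1, w2) := by
  simp only [pvNStep, PySem.Dict.modify]
  by_cases h1 : t.contains w1
  · simp only [h1, if_true]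
    by_cases h2 : (t.getD w1 PySem.Dict.empty).contains w2
    · simp [h2]
    · simp only [Bool.not_eq_true] at h2
      simp [h2, PySem.Dict.getD_insert_self, PySem.Dict.insert_insert_self,
        PySem.Dict.getD_of_not_contains _ _ h2]
  · simp only [Bool.not_eq_true] at h1
    simp [h1, PySem.Dict.getD_insert_self, PySem.Dict.insert_insert_self,
      PySem.Dict.getD_of_not_contains _ _ h1, PySem.Dict.contains_empty,
      PySem.Dict.getD_empty]

lemma pvZipFold {α : Type} (s : List String) (g : α → String → String → α) (t : α) :
    (List.range (s.length - 1)).foldl (fun t k => g t (s.getD k "") (s.getD (k + 1) "")) t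
      = (s.zip s.tail).foldl (fun t p => g t p.1 p.2) t := by
  induction s generalizing t with
  | nil => simp
  | cons x s ih =>
    cases s with
    | nil => simp
    | cons y rest =>
      simp only [List.length_cons, Nat.add_sub_cancel, List.range_succ_eq_map,
        List.foldl_cons, List.foldl_map, List.getD_cons_zero, List.getD_cons_succ,
        List.tail_cons, List.zip_cons_cons]
      exact ih (g t x y)

lemma pvRangeFold_eq_zipFold {α : Type} (s : List String)
    (f : α → String → String → α) (t : α) :
    (PySem.List.pyRange 0 ((s.length : Int) - 1) 1).foldl
        (fun t i => f t (PySem.List.pyGetD s i "") (PySem.List.pyGetD s (i + 1) "")) t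
      = (s.zip s.tail).foldl (fun t p => f t p.1 p.2) t := by
  rcases s with _ | ⟨x, s⟩
  · simp [PySem.List.pyRange]
  · have h : ((x :: s).length : Int) - 1 = (((x :: s).length - 1 : Nat) : Int) := by
      simp
    rw [h, PySem.List.pyRange_zero_natCast, List.foldl_map]
    have hz := pvZipFold (x :: s) f t
    rw [← hz]
    apply PySem.List.foldl_congr_mem
    intro acc k _
    have hk1 : ((k : Int) + 1) = ((k + 1 : Nat) : Int) := by push_cast; ring
    rw [hk1, PySem.List.pyGetD_natCast, PySem.List.pyGetD_natCast]

lemma pvBStep_eq_rstep (r : PySem.Dict String (PySem.Dict String Int))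
    (q : (String × String) × Int) :
    (let r' := r.setdefault q.1.1 PySem.Dict.empty
     r'.insert q.1.1 ((r'.getD q.1.1 PySem.Dict.empty).insert q.1.2 q.2)) = pvRStep r q := by
  unfold pvRStep PySem.Dict.modify
  by_cases hc : r.contains q.1.1
  · simp [PySem.Dict.setdefault_of_contains _ _ hc]
  · rw [Bool.not_eq_true] at hc
    simp [PySem.Dict.setdefault_of_not_contains _ _ hc, PySem.Dict.getD_insert_self,
      PySem.Dict.insert_insert_self, PySem.Dict.getD_of_not_contains _ _ hc,
      PySem.Dict.getD_empty]

lemma pvA_eq_canon (corpus : List (List String)) :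
    count_unigram_transitions corpus
      = (pvCanon (pvBigrams corpus)).items.map (fun q => (q.1, q.2.items)) := by
  unfold count_unigram_transitions
  refine congrArg (fun d : PySem.Dict String (PySem.Dict String Int) =>
    d.items.map (fun q => (q.1, q.2.items))) ?_
  have hsent : ∀ (t : PySem.Dict String (PySem.Dict String Int)) (s : List String),
      (PySem.List.pyRange 0 ((s.length : Int) - 1) 1).foldl (fun t i =>
        let w1 := PySem.List.pyGetD s i ""
        let w2 := PySem.List.pyGetD s (i + 1) ""
        let t' := if t.contains w1 then t else t.insert w1 PySem.Dict.empty
        let inner := t'.getD w1 PySem.Dict.empty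
        let inner' := if inner.contains w2 then inner else inner.insert w2 0
        t'.insert w1 (inner'.insert w2 (inner'.getD w2 0 + 1))) t
      = (s.zip s.tail).foldl pvNStep t := by
    intro t s
    rw [pvRangeFold_eq_zipFold s (fun t w1 w2 =>
      let t' := if t.contains w1 then t else t.insert w1 PySem.Dict.empty
      let inner := t'.getD w1 PySem.Dict.empty
      let inner' := if inner.contains w2 then inner else inner.insert w2 0
      t'.insert w1 (inner'.insert w2 (inner'.getD w2 0 + 1))) t]
    apply PySem.List.foldl_congr_mem
    intro acc p _
    exact pvAStep_eq_nstep acc p.1 p.2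
  calc corpus.foldl (fun t sentence =>
        (PySem.List.pyRange 0 ((sentence.length : Int) - 1) 1).foldl (fun t i =>
          let w1 := PySem.List.pyGetD sentence i ""
          let w2 := PySem.List.pyGetD sentence (i + 1) ""
          let t' := if t.contains w1 then t else t.insert w1 PySem.Dict.empty
          let inner := t'.getD w1 PySem.Dict.empty
          let inner' := if inner.contains w2 then inner else inner.insert w2 0
          t'.insert w1 (inner'.insert w2 (inner'.getD w2 0 + 1))) t) PySem.Dict.empty
      = corpus.foldl (fun t s => (s.zip s.tail).foldl pvNStep t) PySem.Dict.empty := by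
        apply PySem.List.foldl_congr_mem
        intro acc s _
        exact hsent acc s
    _ = (pvBigrams corpus).foldl pvNStep PySem.Dict.empty := (List.foldl_flatMap).symm
    _ = pvCanon (pvBigrams corpus) := pvNFold_eq_canon _

lemma pvB_eq_canon (corpus : List (List String)) :
    count_unigram_transitions_alt corpus
      = (pvCanon (pvBigrams corpus)).items.map (fun q => (q.1, q.2.items)) := by
  unfold count_unigram_transitions_alt
  have hslice : ∀ s : List String, PySem.List.slice s (some 1) none = s.tail := by
    intro s; simp [PySem.List.slice_from]
  simp only [hslice]
  have hflat : corpus.foldl (fun d sentence =>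
      (sentence.zip sentence.tail).foldl (fun d p => d.insert p (d.getD p 0 + 1)) d)
      PySem.Dict.empty = PySem.Dict.counter (pvBigrams corpus) := by
    rw [← PySem.Dict.foldl_insert_getD_add_one_eq_counter, pvBigrams, List.foldl_flatMap]
  rw [hflat]
  refine congrArg (fun d : PySem.Dict String (PySem.Dict String Int) =>
    d.items.map (fun q => (q.1, q.2.items))) ?_
  have hnd : (((PySem.Dict.counter (pvBigrams corpus)).items).map Prod.fst).Nodup := by
    rw [PySem.Dict.items_counter, List.map_map]
    have : ((Prod.fst : (String × String) × Int → String × String) ∘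
        fun k => (k, ((pvBigrams corpus).count k : Int))) = id := rfl
    rw [this, List.map_id]
    exact PySem.Set.nodup_ofList _
  calc (PySem.Dict.counter (pvBigrams corpus)).items.foldl (fun r q =>
        let r' := r.setdefault q.1.1 PySem.Dict.empty
        r'.insert q.1.1 ((r'.getD q.1.1 PySem.Dict.empty).insert q.1.2 q.2)) PySem.Dict.empty
      = (PySem.Dict.counter (pvBigrams corpus)).items.foldl pvRStep PySem.Dict.empty := by
        apply PySem.List.foldl_congr_mem
        intro acc q _
        exact pvBStep_eq_rstep acc q
    _ = pvG ((PySem.Dict.counter (pvBigrams corpus)).items) := pvRFoldG _ hnd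
    _ = pvCanon (pvBigrams corpus) := pvG_counter_eq_canon _

-- ===== VERDICT (by name: the statement is the Claim_ definition above) =====
theorem count_unigram_transitions_spec : Claim_equal_count_unigram_transitions := by
  intro corpus _
  unfold Spec_count_unigram_transitions
  rw [pvA_eq_canon, pvB_eq_canon]
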